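-- pv_equiv track=rewrite | github.com/heechul/drama | re/verify_mappings.py | apply_transform
-- ===== SOURCE A (Python) =====
-- from typing import List, Tuple
--
-- def apply_transform(code: Tuple[int], M: List[List[int]]) -> Tuple[int]:
--     k = len(code)
--     out = [0]*k
--     for j in range(k):
--         s = 0
--         for i in range(k):
--             if code[i] and M[i][j]: s ^= 1
--         out[j] = s
--     return tuple(out)
-- ===== SOURCE B (Python) =====
-- def apply_transform(code, M):
--     k = len(code)
--     rows = [M[i][:k] for i, c in enumerate(code) if c]
--
--     def xor_sum(lo, hi):
--         if lo == hi:
--             return [0] * k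
--         if hi - lo == 1:
--             return [1 if v else 0 for v in rows[lo]]
--         mid = (lo + hi) // 2
--         return [x ^ y for x, y in zip(xor_sum(lo, mid), xor_sum(mid, hi))]
--
--     return tuple(xor_sum(0, len(rows)))
-- ===== Notes on version B (the rewrite author's own statement) =====
-- stated objective: alternative
-- what changed: Replaces the nested per-column dot-product index loops by a filter-then-divide-and-conquer algorithm: the selected rows of M are extracted once by a comprehension, and their GF(2) sum is computed by a recursive halving xor_sum that splits the row list and combines the two half-sums componentwise with zip.
import Mathlib
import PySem

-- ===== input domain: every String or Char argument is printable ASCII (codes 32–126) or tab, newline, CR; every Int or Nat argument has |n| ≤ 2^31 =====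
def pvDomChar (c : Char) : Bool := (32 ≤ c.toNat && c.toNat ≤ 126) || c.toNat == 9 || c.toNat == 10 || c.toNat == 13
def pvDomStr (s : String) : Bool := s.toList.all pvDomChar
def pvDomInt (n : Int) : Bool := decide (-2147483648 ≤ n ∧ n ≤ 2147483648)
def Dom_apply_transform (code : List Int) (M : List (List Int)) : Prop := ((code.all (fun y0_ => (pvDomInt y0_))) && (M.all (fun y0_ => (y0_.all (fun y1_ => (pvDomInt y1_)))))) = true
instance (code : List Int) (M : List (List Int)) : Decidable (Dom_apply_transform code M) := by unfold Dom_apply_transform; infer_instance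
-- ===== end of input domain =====

-- B replaces A's nested per-column index loops by a filter-then-divide-and-conquer algorithm:
-- the selected rows of M are extracted once, and their GF(2) sum is computed by a recursive
-- halving xor_sum combining half-sums componentwise (objective: alternative, same cost class).

-- ===== PORT A =====
-- literal transliteration of A: for each column j, scan all rows i and xor into s
def apply_transform (code : List Int) (M : List (List Int)) : List Int :=
  let k : Int := code.length
  let out : List Int := List.replicate code.length 0
  (PySem.List.pyRange 0 k 1).foldl (fun out j =>
    let s : Int := (PySem.List.pyRange 0 k 1).foldl (fun s i =>
      if PySem.List.pyGetD code i 0 ≠ 0 ∧ PySem.List.pyGetD (PySem.List.pyGetD M i []) j 0 ≠ 0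
      then PySem.Int.bxor s 1 else s) 0
    PySem.List.pySetD out j s) out

-- ===== PORT B =====
-- Source B's inner recursion xor_sum(lo, hi): GF(2) sum of rows[lo:hi] by halving.
-- Python tests `lo == hi`; all calls maintain lo ≤ hi, where `hi ≤ lo` is the same test
-- (and makes Nat termination evident).
def pvXorSum (k : Nat) (rows : List (List Int)) (lo hi : Nat) : List Int :=
  if hi ≤ lo then List.replicate k 0
  else if hi - lo = 1 then (rows.getD lo []).map (fun v => if v ≠ 0 then (1 : Int) else 0)
  else
    List.zipWith (fun x y => PySem.Int.bxor x y)
      (pvXorSum k rows lo ((lo + hi) / 2)) (pvXorSum k rows ((lo + hi) / 2) hi)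
termination_by hi - lo
decreasing_by all_goals omega

-- literal transliteration of Source B: filter the selected rows (truncated to k), divide and conquer
def apply_transform_alt (code : List Int) (M : List (List Int)) : List Int :=
  let k : Nat := code.length
  let rows : List (List Int) :=
    ((PySem.List.enumerate code).filter (fun ic => ic.2 != 0)).map
      (fun ic => PySem.List.slice (PySem.List.pyGetD M ic.1 []) none (some (k : Int)))
  pvXorSum k rows 0 rows.length

-- ===== PRECONDITION & SPEC =====
-- Pre_: exactly the inputs where Python A returns (it raises IndexError iff some nonzero code
-- entry selects a missing row of M or a row shorter than len(code)).
def Pre_apply_transform (code : List Int) (M : List (List Int)) : Prop :=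
  ∀ i ∈ List.range code.length,
    code.getD i 0 ≠ 0 → i < M.length ∧ code.length ≤ (M.getD i []).length
instance (code : List Int) (M : List (List Int)) : Decidable (Pre_apply_transform code M) := by
  unfold Pre_apply_transform; infer_instance
def pvWitness_apply_transform : List Int × List (List Int) :=
  ([1, 0, 2], [[1, 0, 1], [], [0, 1, 1]])
def Spec_apply_transform (code : List Int) (M : List (List Int)) (out : List Int) : Prop := out = apply_transform_alt code M
instance (code : List Int) (M : List (List Int)) (out : List Int) : Decidable (Spec_apply_transform code M out) := by unfold Spec_apply_transform; infer_instance

-- ===== CLAIM (what is proved, stated in full; the proofs are below) =====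
def Claim_equal_apply_transform : Prop := ∀ (code : List Int) (M : List (List Int)), Dom_apply_transform code M → Pre_apply_transform code M → Spec_apply_transform code M (apply_transform code M)

-- ===== LEMMAS AND PROOFS =====

-- the GF(2) parity of column j over the first n rows (A's inner loop)
def pvColf (code : List Int) (M : List (List Int)) (n j : Nat) : Int :=
  (List.range n).foldl (fun s i =>
    if code.getD i 0 ≠ 0 ∧ (M.getD i []).getD j 0 ≠ 0 then PySem.Int.bxor s 1 else s) 0

-- 0/1 indicator of an odd count
def pvInd (n : Nat) : Int := if n % 2 = 1 then 1 else 0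

-- count of nonzero entries of column j over rows lo..hi-1
def pvCnt (rs : List (List Int)) (lo hi j : Nat) : Nat :=
  (List.range' lo (hi - lo)).countP (fun i => decide ((rs.getD i []).getD j 0 ≠ 0))

lemma pv_bxor_ind (a b : Nat) : PySem.Int.bxor (pvInd a) (pvInd b) = pvInd (a + b) := by
  have ha := Nat.mod_two_eq_zero_or_one a
  have hb := Nat.mod_two_eq_zero_or_one b
  unfold pvInd
  rw [Nat.add_mod]
  rcases ha with ha | ha <;> rcases hb with hb | hb <;> rw [ha, hb] <;> decide

lemma pv_zipWith_map {α β : Type} (f : β → β → β) (g h : α → β) (l : List α) :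
    List.zipWith f (l.map g) (l.map h) = l.map (fun x => f (g x) (h x)) := by
  induction l with
  | nil => rfl
  | cons x xs ih => simp [ih]

lemma pv_map_eq_map_range {α β : Type} (l : List α) (d : α) (f : α → β) :
    l.map f = (List.range l.length).map (fun i => f (l.getD i d)) := by
  apply List.ext_getElem
  · simp
  · intro i h1 h2
    simp only [List.length_map] at h1 h2
    simp [List.getD, List.getElem?_eq_getElem, List.getElem_range, h1, h2]

lemma pv_countP_range_getD {α : Type} (l : List α) (d : α) (p : α → Bool) :
    (List.range l.length).countP (fun i => p (l.getD i d)) = l.countP p := by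
  have hmap : (List.range l.length).map (fun i => l.getD i d) = l := by
    apply List.ext_getElem
    · simp
    · intro i h1 h2
      simp only [List.length_map, List.length_range] at h1
      simp [List.getD, List.getElem?_eq_getElem, h1]
  conv_rhs => rw [← hmap]
  rw [List.countP_map]
  rfl

-- B's recursion computes the per-column parity indicator vector
lemma pvXorSum_eq (k : Nat) (rs : List (List Int)) (hlen : ∀ r ∈ rs, r.length = k) :
    ∀ d lo hi, hi - lo = d → lo ≤ hi → hi ≤ rs.length →
      pvXorSum k rs lo hi = (List.range k).map (fun j => pvInd (pvCnt rs lo hi j)) := by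
  intro d
  induction d using Nat.strong_induction_on with
  | _ d ih =>
    intro lo hi hd hle hhi
    rw [pvXorSum]
    by_cases h0 : hi ≤ lo
    · rw [if_pos h0]
      have : hi - lo = 0 := by omega
      simp [pvCnt, this, pvInd, List.map_const']
    · rw [if_neg h0]
      by_cases h1 : hi - lo = 1
      · rw [if_pos h1]
        have hlo : lo < rs.length := by omega
        have hmem : rs.getD lo [] ∈ rs := by
          simp [List.getD, List.getElem?_eq_getElem hlo]
        have hk : (rs.getD lo []).length = k := hlen _ hmem
        rw [pv_map_eq_map_range (rs.getD lo []) 0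
              (fun v => if v ≠ 0 then (1 : Int) else 0), hk]
        apply List.map_congr_left
        intro j _
        have hr1 : List.range' lo (hi - lo) = [lo] := by rw [h1]; rfl
        simp only [pvCnt, hr1, List.countP_cons, List.countP_nil]
        by_cases hv : (rs[lo]?.getD [])[j]?.getD 0 = 0 <;> simp [List.getD, hv, pvInd]
      · rw [if_neg h1]
        have hm1 : lo < (lo + hi) / 2 := by omega
        have hm2 : (lo + hi) / 2 < hi := by omega
        rw [ih ((lo + hi) / 2 - lo) (by omega) lo ((lo + hi) / 2) rfl (by omega) (by omega),
            ih (hi - (lo + hi) / 2) (by omega) ((lo + hi) / 2) hi rfl (by omega) hhi]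
        rw [pv_zipWith_map]
        apply List.map_congr_left
        intro j _
        rw [pv_bxor_ind]
        congr 1
        unfold pvCnt
        rw [← List.countP_append]
        congr 1
        have harith : (lo + hi) / 2 - lo + (hi - (lo + hi) / 2) = hi - lo := by omega
        have hstart : lo + ((lo + hi) / 2 - lo) = (lo + hi) / 2 := by omega
        rw [← harith, ← List.range'_append_1, hstart]

-- A's inner loop computes the parity indicator of the column count
lemma pvColf_cnt (code : List Int) (M : List (List Int)) (j : Nat) (n : Nat) :
    pvColf code M n j =
      pvInd ((List.range n).countP
        (fun i => decide (code.getD i 0 ≠ 0 ∧ (M.getD i []).getD j 0 ≠ 0))) := by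
  induction n with
  | zero => simp [pvColf, pvInd]
  | succ n ihn =>
    unfold pvColf at ihn ⊢
    rw [List.range_succ, List.foldl_append, List.countP_append, ihn]
    simp only [List.foldl_cons, List.foldl_nil, List.countP_cons, List.countP_nil]
    by_cases hc : code.getD n 0 ≠ 0 ∧ (M.getD n []).getD j 0 ≠ 0
    · rw [if_pos hc]
      have hb : PySem.Int.bxor
          (pvInd ((List.range n).countP
            (fun i => decide (code.getD i 0 ≠ 0 ∧ (M.getD i []).getD j 0 ≠ 0)))) 1
          = PySem.Int.bxor
          (pvInd ((List.range n).countP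
            (fun i => decide (code.getD i 0 ≠ 0 ∧ (M.getD i []).getD j 0 ≠ 0)))) (pvInd 1) := by
        rfl
      rw [hb, pv_bxor_ind]
      simp only [List.getD] at hc
      congr 1
      simp [hc.1, hc.2]
    · rw [if_neg hc]
      simp only [List.getD] at hc
      by_cases h1 : code[n]?.getD 0 = 0
      · simp [h1]
      · have h2 : (M[n]?.getD [])[j]?.getD 0 = 0 := by tauto
        simp [h2]

-- A's outer loop: writing g j at position j for j = 0,…,n-1
set_option maxRecDepth 8192 in
lemma pv_foldl_set_range (g : Nat → Int) :
    ∀ (n : Nat) (out : List Int), n ≤ out.length →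
      (List.range n).foldl (fun o j => o.set j (g j)) out
        = (List.range n).map g ++ out.drop n := by
  intro n
  induction n with
  | zero => simp
  | succ n ih =>
    intro out hn
    have hnlt : n < out.length := by omega
    rw [List.range_succ, List.foldl_append, ih out (by omega)]
    have hlen : ((List.range n).map g).length = n := by simp
    rw [List.foldl_cons, List.foldl_nil, List.map_append, List.set_append, hlen]
    rw [if_neg (Nat.lt_irrefl n), Nat.sub_self]
    rw [List.drop_eq_getElem_cons hnlt, List.set_cons_zero]
    simp

lemma pv_A_eq (code : List Int) (M : List (List Int)) :
    apply_transform code M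
      = (List.range code.length).map (fun j => pvColf code M code.length j) := by
  unfold apply_transform
  simp only [PySem.List.pyRange_zero_nat, List.foldl_map, PySem.List.pyGetD_natCast,
    PySem.List.pySetD_natCast]
  show List.foldl (fun o j => o.set j (pvColf code M code.length j))
      (List.replicate code.length 0) (List.range code.length) = _
  rw [pv_foldl_set_range (fun j => pvColf code M code.length j) code.length
        (List.replicate code.length (0:Int)) (by simp)]
  simp

-- the rows Source B builds
def pvRows (code : List Int) (M : List (List Int)) : List (List Int) :=
  ((PySem.List.enumerate code).filter (fun ic => ic.2 != 0)).map
    (fun ic => PySem.List.slice (PySem.List.pyGetD M ic.1 []) none (some (code.length : Int)))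

lemma pvRows_len (code : List Int) (M : List (List Int))
    (hpre : Pre_apply_transform code M) :
    ∀ r ∈ pvRows code M, r.length = code.length := by
  intro r hr
  unfold pvRows at hr
  rcases List.mem_map.mp hr with ⟨ic, hic, hre⟩
  rcases List.mem_filter.mp hic with ⟨hmem, hne⟩
  rcases (PySem.List.mem_enumerate_iff _ _ _).mp hmem with ⟨m, hm, hic2⟩
  subst hic2
  simp only [bne_iff_ne, ne_eq] at hne
  have hsel : code.getD m 0 ≠ 0 := by
    simpa [List.getD, List.getElem?_eq_getElem hm] using hne
  have hbound := hpre m (List.mem_range.mpr hm) hsel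
  subst hre
  simp only [zero_add]
  rw [PySem.List.pyGetD_natCast, PySem.List.slice_to_natCast]
  have h2 : code.length ≤ (M.getD m []).length := hbound.2
  simp only [List.getD] at h2
  rw [List.length_take]
  omega

-- count bridge: B's per-column count over the selected rows equals A's per-column count
lemma pv_cnt_bridge (code : List Int) (M : List (List Int))
    (hpre : Pre_apply_transform code M) (j : Nat) (hj : j < code.length) :
    pvCnt (pvRows code M) 0 (pvRows code M).length j
      = (List.range code.length).countP
          (fun i => decide (code.getD i 0 ≠ 0 ∧ (M.getD i []).getD j 0 ≠ 0)) := by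
  unfold pvCnt
  rw [Nat.sub_zero, ← List.range_eq_range']
  rw [pv_countP_range_getD (pvRows code M) [] (fun r => decide (r.getD j 0 ≠ 0))]
  unfold pvRows
  rw [List.countP_map, List.countP_filter]
  rw [PySem.List.enumerate_eq_map_pyRange code 0, PySem.List.len,
      PySem.List.pyRange_zero_nat, List.map_map, List.countP_map]
  apply List.countP_congr
  intro i hi
  have hilt : i < code.length := List.mem_range.mp hi
  simp only [Function.comp, PySem.List.pyGetD_natCast]
  by_cases hc : code.getD i 0 ≠ 0
  · have hbound := hpre i (List.mem_range.mpr hilt) hc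
    simp only [List.getD] at hc
    simp [PySem.List.slice_to_natCast, List.getElem?_take_of_lt hj, List.getD, hc]
  · have h0 : code[i]?.getD 0 = 0 := by simpa [List.getD] using hc
    simp [h0]

lemma pv_B_eq (code : List Int) (M : List (List Int))
    (hpre : Pre_apply_transform code M) :
    apply_transform_alt code M
      = (List.range code.length).map
          (fun j => pvInd (pvCnt (pvRows code M) 0 (pvRows code M).length j)) := by
  unfold apply_transform_alt
  exact pvXorSum_eq code.length (pvRows code M) (pvRows_len code M hpre)
    ((pvRows code M).length - 0) 0 (pvRows code M).length rfl (Nat.zero_le _) le_rfl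

-- ===== VERDICT (by name: the statement is the Claim_ definition above) =====
theorem apply_transform_spec : Claim_equal_apply_transform := by
  intro code M _ hpre
  unfold Spec_apply_transform
  rw [pv_A_eq, pv_B_eq code M hpre]
  apply List.map_congr_left
  intro j hj
  rw [pvColf_cnt, pv_cnt_bridge code M hpre j (List.mem_range.mp hj)]
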